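-- pv_equiv track=rewrite | github.com/sun475300-sudo/Swarm-control-in-sc2bot | wicked_zerg_challenger/game_result_reporter.py | _analyze_economy
-- ===== SOURCE A (Python) =====
-- from typing import Dict, List, Optional, Any
--
-- def _analyze_economy(game_data: Dict) -> List[str]:
--     """경제 분석"""
--     lines = []
--     snapshots = game_data.get("resource_snapshots", [])
--
--     if not snapshots:
--         lines.append("No resource data available")
--         return lines
--
--     # 최대 자원 시점
--     max_minerals = max((s.get("minerals", 0) for s in snapshots), default=0)
--     max_vespene = max((s.get("vespene", 0) for s in snapshots), default=0)
--     max_workers = max((s.get("workers", 0) for s in snapshots), default=0)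
--
--     lines.append(f"Peak Minerals: {max_minerals}")
--     lines.append(f"Peak Vespene: {max_vespene}")
--     lines.append(f"Peak Workers: {max_workers}")
--
--     # 자원 낭비 감지 (미네랄 > 1000 이상인 시간)
--     high_mineral_time = sum(
--         1 for s in snapshots if s.get("minerals", 0) > 1000
--     )
--     if high_mineral_time > 0:
--         lines.append(f"High mineral periods (>1000): {high_mineral_time} snapshots")
--         lines.append("  -> Consider spending faster or adding production")
--
--     return lines
-- ===== SOURCE B (Python) =====
-- def _analyze_economy(game_data):
--     """Single pass over snapshots with running maxima and a high-mineral counter."""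
--     snapshots = game_data.get("resource_snapshots", [])
--     if not snapshots:
--         return ["No resource data available"]
--     first = snapshots[0]
--     mm = first.get("minerals", 0)
--     mv = first.get("vespene", 0)
--     mw = first.get("workers", 0)
--     high = 1 if mm > 1000 else 0
--     for s in snapshots[1:]:
--         m = s.get("minerals", 0)
--         v = s.get("vespene", 0)
--         w = s.get("workers", 0)
--         if m > mm:
--             mm = m
--         if v > mv:
--             mv = v
--         if w > mw:
--             mw = w
--         if m > 1000:
--             high += 1
--     lines = [
--         f"Peak Minerals: {mm}",
--         f"Peak Vespene: {mv}",
--         f"Peak Workers: {mw}",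
--     ]
--     if high > 0:
--         lines.append(f"High mineral periods (>1000): {high} snapshots")
--         lines.append("  -> Consider spending faster or adding production")
--     return lines
-- ===== Notes on version B (the rewrite author's own statement) =====
-- stated objective: alternative
-- what changed: Replaced A's four separate passes (three max() generator passes and a sum() pass) by one loop that maintains running maxima seeded from the first snapshot and a high-mineral counter.
import Mathlib
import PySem

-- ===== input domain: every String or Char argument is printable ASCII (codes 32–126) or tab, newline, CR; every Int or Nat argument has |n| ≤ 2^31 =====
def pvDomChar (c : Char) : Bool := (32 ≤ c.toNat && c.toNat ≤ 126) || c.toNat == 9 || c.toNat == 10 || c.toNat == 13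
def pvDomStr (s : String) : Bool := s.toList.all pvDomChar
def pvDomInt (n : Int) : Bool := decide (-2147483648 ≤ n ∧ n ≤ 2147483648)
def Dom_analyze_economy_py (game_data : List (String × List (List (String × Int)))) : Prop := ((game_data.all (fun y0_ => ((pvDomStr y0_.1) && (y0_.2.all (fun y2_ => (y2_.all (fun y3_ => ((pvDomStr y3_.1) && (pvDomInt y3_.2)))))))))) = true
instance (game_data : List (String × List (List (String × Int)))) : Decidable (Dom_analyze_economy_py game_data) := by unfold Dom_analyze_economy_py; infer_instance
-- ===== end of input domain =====

-- B replaces A's four separate passes (three max() scans and a count scan) by one loop with running maxima seeded from the first snapshot and a high-mineral counter; same output, same cost.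


-- ===== PORT A =====
-- A: three max() passes (via PySem.List.max?) and a sum() pass, then the lines.
def analyze_economy_py (game_data : List (String × List (List (String × Int)))) : List String :=
  let snapshots := PySem.Dict.getD (PySem.Dict.mk game_data) "resource_snapshots" []
  if snapshots = [] then ["No resource data available"]
  else
    let max_minerals := (PySem.List.max? (snapshots.map (fun s => PySem.Dict.getD (PySem.Dict.mk s) "minerals" 0)) (fun x => x)).getD 0
    let max_vespene := (PySem.List.max? (snapshots.map (fun s => PySem.Dict.getD (PySem.Dict.mk s) "vespene" 0)) (fun x => x)).getD 0
    let max_workers := (PySem.List.max? (snapshots.map (fun s => PySem.Dict.getD (PySem.Dict.mk s) "workers" 0)) (fun x => x)).getD 0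
    let high_mineral_time : Int := snapshots.foldl (fun acc s => if PySem.Dict.getD (PySem.Dict.mk s) "minerals" 0 > 1000 then acc + 1 else acc) 0
    ["Peak Minerals: " ++ PySem.Int.toStr max_minerals,
     "Peak Vespene: " ++ PySem.Int.toStr max_vespene,
     "Peak Workers: " ++ PySem.Int.toStr max_workers] ++
    (if high_mineral_time > 0 then
      ["High mineral periods (>1000): " ++ PySem.Int.toStr high_mineral_time ++ " snapshots",
       "  -> Consider spending faster or adding production"]
     else [])

-- ===== PORT B =====
-- B: one loop carrying the three running maxima and the high-mineral counter.
def aeLoop : List (List (String × Int)) → Int → Int → Int → Int → Int × Int × Int × Int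
  | [], mm, mv, mw, h => (mm, mv, mw, h)
  | s :: rest, mm, mv, mw, h =>
    let m := PySem.Dict.getD (PySem.Dict.mk s) "minerals" 0
    let v := PySem.Dict.getD (PySem.Dict.mk s) "vespene" 0
    let w := PySem.Dict.getD (PySem.Dict.mk s) "workers" 0
    aeLoop rest (if m > mm then m else mm) (if v > mv then v else mv)
      (if w > mw then w else mw) (if m > 1000 then h + 1 else h)

def analyze_economy_py_alt (game_data : List (String × List (List (String × Int)))) : List String :=
  match PySem.Dict.getD (PySem.Dict.mk game_data) "resource_snapshots" [] with
  | [] => ["No resource data available"]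
  | first :: rest =>
    let m0 := PySem.Dict.getD (PySem.Dict.mk first) "minerals" 0
    let v0 := PySem.Dict.getD (PySem.Dict.mk first) "vespene" 0
    let w0 := PySem.Dict.getD (PySem.Dict.mk first) "workers" 0
    let r := aeLoop rest m0 v0 w0 (if m0 > 1000 then 1 else 0)
    ["Peak Minerals: " ++ PySem.Int.toStr r.1,
     "Peak Vespene: " ++ PySem.Int.toStr r.2.1,
     "Peak Workers: " ++ PySem.Int.toStr r.2.2.1] ++
    (if r.2.2.2 > 0 then
      ["High mineral periods (>1000): " ++ PySem.Int.toStr r.2.2.2 ++ " snapshots",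
       "  -> Consider spending faster or adding production"]
     else [])

-- ===== PRECONDITION & SPEC =====
def Spec_analyze_economy_py (game_data : List (String × List (List (String × Int)))) (out : List String) : Prop := out = analyze_economy_py_alt game_data
instance (game_data : List (String × List (List (String × Int)))) (out : List String) : Decidable (Spec_analyze_economy_py game_data out) := by unfold Spec_analyze_economy_py; infer_instance

-- ===== CLAIM (what is proved, stated in full; the proofs are below) =====
def Claim_equal_analyze_economy_py : Prop := ∀ (game_data : List (String × List (List (String × Int)))), Dom_analyze_economy_py game_data → Spec_analyze_economy_py game_data (analyze_economy_py game_data)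

-- ===== LEMMAS AND PROOFS =====

-- ===== VERDICT (by name: the statement is the Claim_ definition above) =====
lemma aeLoop_eq (l : List (List (String × Int))) (mm mv mw h : Int) :
    aeLoop l mm mv mw h =
      (l.foldl (fun a s => max a (PySem.Dict.getD (PySem.Dict.mk s) "minerals" 0)) mm,
       l.foldl (fun a s => max a (PySem.Dict.getD (PySem.Dict.mk s) "vespene" 0)) mv,
       l.foldl (fun a s => max a (PySem.Dict.getD (PySem.Dict.mk s) "workers" 0)) mw,
       h + (l.countP (fun s => PySem.Dict.getD (PySem.Dict.mk s) "minerals" 0 > 1000) : Int)) := by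
  induction l generalizing mm mv mw h with
  | nil => simp [aeLoop]
  | cons s rest ih =>
    have e : ∀ a b : Int, (if b > a then b else a) = max a b := by
      intro a b; split_ifs <;> omega
    simp only [aeLoop, e, ih, List.foldl_cons, List.countP_cons, Prod.mk.injEq]
    refine ⟨trivial, trivial, trivial, ?_⟩
    push_cast
    simp only [decide_eq_true_eq]
    split_ifs <;> omega

lemma count_cons_int (first : List (String × Int)) (rest : List (List (String × Int))) :
    ((if PySem.Dict.getD (PySem.Dict.mk first) "minerals" 0 > 1000 then (1:Int) else 0)
      + (rest.countP (fun s => PySem.Dict.getD (PySem.Dict.mk s) "minerals" 0 > 1000) : Int))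
    = (((first :: rest).countP (fun s => PySem.Dict.getD (PySem.Dict.mk s) "minerals" 0 > 1000) : Int)) := by
  simp only [List.countP_cons]
  push_cast
  simp only [decide_eq_true_eq]
  split_ifs <;> omega

theorem analyze_economy_py_spec : Claim_equal_analyze_economy_py := by
  unfold Claim_equal_analyze_economy_py
  intro game_data _
  unfold Spec_analyze_economy_py analyze_economy_py analyze_economy_py_alt
  cases hs : PySem.Dict.getD (PySem.Dict.mk game_data) "resource_snapshots" [] with
  | nil => simp
  | cons first rest =>
    simp only [if_neg, reduceCtorEq, not_false_iff]
    rw [aeLoop_eq, count_cons_int]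
    simp only [List.map_cons, PySem.List.max?_id_cons, Option.getD_some, List.foldl_map,
      PySem.List.foldl_ite_add_one, zero_add]
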